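-- pv_equiv track=rewrite | github.com/ModPunchtree/Compressed-Bad-Apple | OLD compressiom program.py | reduceDifferences
-- ===== SOURCE A (Python) =====
-- def reduceDifferences(differences: list, poppedIndex: int) -> list:
--     indexOffset = 0
--     for index in range(len(differences)):
--         index += indexOffset
--         if poppedIndex in differences[index][: -1]:
--             differences.pop(index)
--             indexOffset -= 1
--         else:
--             differences[index][0] -= (differences[index][0] > poppedIndex)
--             differences[index][1] -= (differences[index][1] > poppedIndex)
--
--     return differences
-- ===== SOURCE B (Python) =====
-- def reduceDifferences(differences: list, poppedIndex: int) -> list: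
--     # filter pass, then transform pass; slice assignment keeps mutation in place
--     differences[:] = [d for d in differences if poppedIndex not in d[:-1]]
--     for d in differences:
--         d[0] -= d[0] > poppedIndex
--         d[1] -= d[1] > poppedIndex
--     return differences
-- ===== Notes on version B (the rewrite author's own statement) =====
-- stated objective: simpler
-- what changed: Replaces the interleaved pop-with-index-offset loop by a filter pass (slice assignment, preserving in-place mutation) followed by a separate decrement pass over the survivors.
import Mathlib
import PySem

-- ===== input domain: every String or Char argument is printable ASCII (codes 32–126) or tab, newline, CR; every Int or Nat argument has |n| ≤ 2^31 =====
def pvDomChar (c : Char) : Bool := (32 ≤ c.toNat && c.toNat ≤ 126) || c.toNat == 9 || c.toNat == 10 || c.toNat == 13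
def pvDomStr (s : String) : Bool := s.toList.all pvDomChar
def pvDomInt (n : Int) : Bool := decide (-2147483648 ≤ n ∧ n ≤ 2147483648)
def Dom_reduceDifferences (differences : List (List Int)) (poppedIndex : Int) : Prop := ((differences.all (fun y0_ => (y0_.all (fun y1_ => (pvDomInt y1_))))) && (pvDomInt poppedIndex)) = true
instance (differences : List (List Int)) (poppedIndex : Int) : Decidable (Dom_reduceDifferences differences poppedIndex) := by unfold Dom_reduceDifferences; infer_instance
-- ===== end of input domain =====

-- B replaces A's interleaved pop-with-index-offset loop by a filter pass followed by a
-- decrement pass (same return value; A also mutates its argument in place, and the Python B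
-- reproduces that mutation via slice assignment — the equivalence proved here is about the
-- return value).

-- ===== PORT A =====
-- differences[index][0] -= (differences[index][0] > poppedIndex); same for [1]
def pvA_fix (poppedIndex : Int) (d : List Int) : List Int :=
  let d1 := PySem.List.pySetD d 0
      (PySem.List.pyGetD d 0 0 - (if PySem.List.pyGetD d 0 0 > poppedIndex then 1 else 0))
  PySem.List.pySetD d1 1
      (PySem.List.pyGetD d1 1 0 - (if PySem.List.pyGetD d1 1 0 > poppedIndex then 1 else 0))

-- one iteration of A's loop body; st = (differences, indexOffset)
def pvA_body (poppedIndex : Int) (st : List (List Int) × Int) (index0 : Nat) : List (List Int) × Int :=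
  let index : Int := (index0 : Int) + st.2
  let d := PySem.List.pyGetD st.1 index []
  if poppedIndex ∈ PySem.List.slice d none (some (-1)) then
    (((PySem.List.pop? st.1 index).map Prod.snd).getD st.1, st.2 - 1)
  else
    (PySem.List.pySetD st.1 index (pvA_fix poppedIndex d), st.2)

def reduceDifferences (differences : List (List Int)) (poppedIndex : Int) : List (List Int) :=
  ((List.range differences.length).foldl (pvA_body poppedIndex) (differences, 0)).1

-- ===== PORT B =====
-- d[0] -= d[0] > poppedIndex; d[1] -= d[1] > poppedIndex  (B's second pass, per entry)
def pvB_transform (poppedIndex : Int) (d : List Int) : List Int :=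
  let d1 := PySem.List.pySetD d 0
      (PySem.List.pyGetD d 0 0 - (if PySem.List.pyGetD d 0 0 > poppedIndex then 1 else 0))
  PySem.List.pySetD d1 1
      (PySem.List.pyGetD d1 1 0 - (if PySem.List.pyGetD d1 1 0 > poppedIndex then 1 else 0))

def reduceDifferences_alt (differences : List (List Int)) (poppedIndex : Int) : List (List Int) :=
  (differences.filter
      (fun d => !(decide (poppedIndex ∈ PySem.List.slice d none (some (-1)))))).map
    (pvB_transform poppedIndex)

-- ===== PRECONDITION & SPEC =====
-- Pre_ excludes exactly the inputs on which A raises IndexError: an entry that is not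
-- dropped (poppedIndex not in d[:-1]) but has fewer than 2 elements, so d[1] (or d[0]) fails.
def Pre_reduceDifferences (differences : List (List Int)) (poppedIndex : Int) : Prop :=
  ∀ d ∈ differences, poppedIndex ∈ d.dropLast ∨ 2 ≤ d.length
instance (differences : List (List Int)) (poppedIndex : Int) : Decidable (Pre_reduceDifferences differences poppedIndex) := by unfold Pre_reduceDifferences; infer_instance

def pvWitness_reduceDifferences : List (List Int) × Int := ([[0, 3], [1, 2, 5], [4, 0]], 1)

def Spec_reduceDifferences (differences : List (List Int)) (poppedIndex : Int) (out : List (List Int)) : Prop := out = reduceDifferences_alt differences poppedIndex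
instance (differences : List (List Int)) (poppedIndex : Int) (out : List (List Int)) : Decidable (Spec_reduceDifferences differences poppedIndex out) := by unfold Spec_reduceDifferences; infer_instance

-- ===== CLAIM (what is proved, stated in full; the proofs are below) =====
def Claim_equal_reduceDifferences : Prop := ∀ (differences : List (List Int)) (poppedIndex : Int), Dom_reduceDifferences differences poppedIndex → Pre_reduceDifferences differences poppedIndex → Spec_reduceDifferences differences poppedIndex (reduceDifferences differences poppedIndex)

-- ===== LEMMAS AND PROOFS =====

theorem pv_getD_append_self (done t : List (List Int)) (h : List Int) :
    (done ++ h :: t).getD done.length [] = h := by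
  induction done with
  | nil => rfl
  | cons a as ih => simp

theorem pv_eraseIdx_append_self (done t : List (List Int)) (h : List Int) :
    (done ++ h :: t).eraseIdx done.length = done ++ t := by
  induction done with
  | nil => rfl
  | cons a as ih => simp [ih]

theorem pv_set_append_self (done t : List (List Int)) (h v : List Int) :
    (done ++ h :: t).set done.length v = done ++ v :: t := by
  induction done with
  | nil => rfl
  | cons a as ih => simp [ih]

theorem pv_loop (poppedIndex : Int) :
    ∀ (rest done : List (List Int)) (k : Nat),
      (∀ d ∈ rest, poppedIndex ∈ d.dropLast ∨ 2 ≤ d.length) →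
      (List.range' k rest.length).foldl (pvA_body poppedIndex)
          (done ++ rest, (done.length : Int) - k)
        = (done ++ reduceDifferences_alt rest poppedIndex,
           ((done ++ reduceDifferences_alt rest poppedIndex).length : Int) - (k + rest.length)) := by
  intro rest
  induction rest with
  | nil =>
      intro done k _
      simp [reduceDifferences_alt]
  | cons h t ih =>
      intro done k hpre
      have hidx : ((k : Int) + ((done.length : Int) - k)) = (done.length : Int) := by ring
      have hlen : done.length < (done ++ h :: t).length := by simp
      have hstep :
          pvA_body poppedIndex (done ++ h :: t, (done.length : Int) - k) k
            = if poppedIndex ∈ h.dropLast then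
                (done ++ t, (done.length : Int) - (k + 1))
              else
                (done ++ pvA_fix poppedIndex h :: t, (done.length : Int) - k) := by
        unfold pvA_body
        simp only [hidx]
        rw [show ((done.length : Int)) = ((done.length : Nat) : Int) from rfl]
        rw [PySem.List.pyGetD_natCast, pv_getD_append_self,
            PySem.List.slice_to_neg_one,
            PySem.List.pop?_natCast (done ++ h :: t) done.length hlen, pv_eraseIdx_append_self,
            PySem.List.pySetD_natCast, pv_set_append_self]
        split <;> simp <;> ring
      have hcond : poppedIndex ∈ PySem.List.slice h none (some (-1)) ↔ poppedIndex ∈ h.dropLast := by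
        rw [PySem.List.slice_to_neg_one]
      rw [show (h :: t).length = t.length + 1 from rfl, List.range'_succ, List.foldl_cons, hstep]
      by_cases hd : poppedIndex ∈ h.dropLast
      · rw [if_pos hd]
        have halt : reduceDifferences_alt (h :: t) poppedIndex = reduceDifferences_alt t poppedIndex := by
          unfold reduceDifferences_alt
          rw [List.filter_cons_of_neg (by simp [hcond, hd])]
        rw [halt]
        have hrec := ih done (k + 1) (fun d hm => hpre d (List.mem_cons_of_mem _ hm))
        push_cast at hrec ⊢
        rw [hrec]
        refine Prod.ext rfl ?_
        push_cast
        ring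
      · rw [if_neg hd]
        have halt : reduceDifferences_alt (h :: t) poppedIndex
            = pvB_transform poppedIndex h :: reduceDifferences_alt t poppedIndex := by
          unfold reduceDifferences_alt
          rw [List.filter_cons_of_pos (by simp [hcond, hd])]
          rfl
        have hfix : pvA_fix poppedIndex h = pvB_transform poppedIndex h := rfl
        have hrec := ih (done ++ [pvA_fix poppedIndex h]) (k + 1)
          (fun d hm => hpre d (List.mem_cons_of_mem _ hm))
        simp only [List.length_append, List.length_cons, List.length_nil, List.append_assoc,
          List.cons_append, List.nil_append] at hrec ⊢
        push_cast at hrec ⊢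
        rw [show ((done.length : Int)) - (k : Int) = (done.length : Int) + 1 - ((k : Int) + 1) by ring, hrec,
          halt, hfix]
        refine Prod.ext rfl ?_
        simp only [List.length_cons]
        push_cast
        ring

-- ===== VERDICT (by name: the statement is the Claim_ definition above) =====
theorem reduceDifferences_spec : Claim_equal_reduceDifferences := by
  intro differences poppedIndex _ hpre
  unfold Spec_reduceDifferences reduceDifferences
  rw [List.range_eq_range']
  have := pv_loop poppedIndex differences [] 0 hpre
  simp only [List.nil_append, List.length_nil, Nat.cast_zero, sub_zero, zero_add] at this
  rw [this]
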